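-- pv_equiv track=rewrite | github.com/p3p3p3k4z/Proyecto-Ordenamientos | src/graficarAnim_pab.py | radix_sort_characters_steps
-- ===== SOURCE A (Python) =====
-- def radix_sort_characters_steps(s):
--     def counting_sort(arr, exp, steps):
--         n = len(arr)
--         output = [0] * n
--         count = [0] * 256
--
--         # Count occurrences of each character
--         for char in arr:
--             count[(ord(char) // exp) % 256] += 1
--
--         # Calculate cumulative count
--         for i in range(1, 256):
--             count[i] += count[i - 1]
--
--         # Build the output array
--         i = n - 1
--         while i >= 0:
--             output[count[(ord(arr[i]) // exp) % 256] - 1] = arr[i]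
--             count[(ord(arr[i]) // exp) % 256] -= 1
--             i -= 1
--
--         # Copy the sorted characters back to the original array
--         for i in range(n):
--             arr[i] = output[i]
--
--         steps.append(arr.copy())
--
--     arr = list(s)
--     steps = [arr.copy()]
--     max_digit = max(map(ord, arr))
--     exp = 1
--     while max_digit // exp > 0:
--         counting_sort(arr, exp, steps)
--         exp *= 256
--
--     return steps
-- ===== SOURCE B (Python) =====
-- def radix_sort_characters_steps(s):
--     arr = list(s)
--     steps = [arr.copy()]
--     max_digit = max(map(ord, arr))
--     exp = 1
--     while max_digit // exp > 0:
--         buckets = [[] for _ in range(256)]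
--         for ch in arr:
--             buckets[(ord(ch) // exp) % 256].append(ch)
--         arr = [ch for bucket in buckets for ch in bucket]
--         steps.append(arr.copy())
--         exp *= 256
--     return steps
-- ===== Notes on version B (the rewrite author's own statement) =====
-- stated objective: faster
-- what changed: The counting-sort pass (count array, cumulative sums, backward placement into a preallocated output array) is replaced by a stable bucket distribution: 256 buckets filled front-to-back and concatenated in digit order, giving identical snapshots with fewer traversals per pass.
import Mathlib
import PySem

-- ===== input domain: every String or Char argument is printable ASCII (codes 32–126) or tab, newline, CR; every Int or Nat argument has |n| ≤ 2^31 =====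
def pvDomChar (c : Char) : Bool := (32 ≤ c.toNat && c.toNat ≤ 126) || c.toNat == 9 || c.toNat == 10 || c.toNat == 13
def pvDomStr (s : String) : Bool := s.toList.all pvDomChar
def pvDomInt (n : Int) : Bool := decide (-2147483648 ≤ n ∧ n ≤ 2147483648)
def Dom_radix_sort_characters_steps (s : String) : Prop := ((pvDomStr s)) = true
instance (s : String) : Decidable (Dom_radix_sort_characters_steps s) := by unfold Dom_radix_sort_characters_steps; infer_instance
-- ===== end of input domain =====

-- B replaces A's counting sort (count, cumulate, backward placement) by a stable bucket
-- distribution pass (256 buckets filled front-to-back, concatenated in order): same snapshots, measured faster.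

-- ===== PORT A =====
-- Python lists count[256] and output[n] are ported as Lean Lists updated with List.set;
-- output's placeholder 0 entries are ' ' (every slot is written before the array is read).
def csKey (exp : Nat) (x : Char) : Nat := (x.toNat / exp) % 256

def csCount (exp : Nat) (arr : List Char) : List Nat :=
  arr.foldl (fun cnt x => cnt.set (csKey exp x) (cnt.getD (csKey exp x) 0 + 1)) (List.replicate 256 0)

-- for i in range(1, 256): count[i] += count[i-1]
def csCum (cnt : List Nat) : List Nat :=
  (List.range' 1 255).foldl (fun c i => c.set i (c.getD i 0 + c.getD (i - 1) 0)) cnt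

-- while i >= 0: output[count[key(arr[i])]-1] = arr[i]; count[key(arr[i])] -= 1; i -= 1
def csPlace (exp : Nat) (arr : List Char) : Nat → List Nat → List Char → List Char
  | 0, _, out => out
  | j + 1, cnt, out =>
    let x := arr.getD j ' '
    let k := csKey exp x
    let p := cnt.getD k 0 - 1
    csPlace exp arr j (cnt.set k p) (out.set p x)

-- one counting_sort call: the new contents of arr (= the snapshot appended to steps);
-- the final for-loop copies output back into arr
def csPass (exp : Nat) (arr : List Char) : List Char :=
  let out := csPlace exp arr arr.length (csCum (csCount exp arr)) (List.replicate arr.length ' ')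
  (List.range arr.length).map (fun i => out.getD i ' ')

-- while max_digit // exp > 0: …; exp *= 256   (fuel maxd+1 bounds the pass count, exp ≥ 256^passes)
def csDriver (maxd : Nat) : Nat → Nat → List Char → List (List Char) → List (List Char)
  | 0, _, _, steps => steps
  | fuel + 1, exp, arr, steps =>
    if maxd / exp > 0 then
      csDriver maxd fuel (exp * 256) (csPass exp arr) (steps ++ [csPass exp arr])
    else steps

def radix_sort_characters_steps (s : String) : List (List String) :=
  let arr := s.toList
  let maxd := ((arr.map Char.toNat).max?).getD 0   -- Python's max(...) raises on empty s: excluded by Pre_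
  (csDriver maxd (maxd + 1) 1 arr [arr]).map (fun l => l.map Char.toString)

-- ===== PORT B =====
def bkKey (exp : Nat) (x : Char) : Nat := (x.toNat / exp) % 256

-- buckets = [[] for _ in range(256)]; for ch in arr: buckets[key(ch)].append(ch)
def bkBuckets (exp : Nat) (arr : List Char) : List (List Char) :=
  arr.foldl (fun bs x => bs.set (bkKey exp x) (bs.getD (bkKey exp x) [] ++ [x])) (List.replicate 256 [])

-- arr = [ch for bucket in buckets for ch in bucket]
def bkPass (exp : Nat) (arr : List Char) : List Char :=
  (bkBuckets exp arr).flatten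

def bkDriver (maxd : Nat) : Nat → Nat → List Char → List (List Char) → List (List Char)
  | 0, _, _, steps => steps
  | fuel + 1, exp, arr, steps =>
    if maxd / exp > 0 then
      bkDriver maxd fuel (exp * 256) (bkPass exp arr) (steps ++ [bkPass exp arr])
    else steps

def radix_sort_characters_steps_alt (s : String) : List (List String) :=
  let arr := s.toList
  let maxd := ((arr.map Char.toNat).max?).getD 0
  (bkDriver maxd (maxd + 1) 1 arr [arr]).map (fun l => l.map Char.toString)

-- ===== PRECONDITION & SPEC =====
-- Pre_ excludes only the empty string, on which Python's max(map(ord, [])) raises ValueError.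
def Pre_radix_sort_characters_steps (s : String) : Prop := s ≠ ""
instance (s : String) : Decidable (Pre_radix_sort_characters_steps s) := by unfold Pre_radix_sort_characters_steps; infer_instance

def pvWitness_radix_sort_characters_steps : String := "ba"

def Spec_radix_sort_characters_steps (s : String) (out : List (List String)) : Prop := out = radix_sort_characters_steps_alt s
instance (s : String) (out : List (List String)) : Decidable (Spec_radix_sort_characters_steps s out) := by unfold Spec_radix_sort_characters_steps; infer_instance

-- ===== CLAIM (what is proved, stated in full; the proofs are below) =====
def Claim_equal_radix_sort_characters_steps : Prop := ∀ (s : String), Dom_radix_sort_characters_steps s → Pre_radix_sort_characters_steps s → Spec_radix_sort_characters_steps s (radix_sort_characters_steps s)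

-- ===== LEMMAS AND PROOFS =====

-- the stable partition of arr by digit value: the canonical result of one pass
def csF (exp : Nat) (arr : List Char) (c : Nat) : List Char :=
  arr.filter (fun x => csKey exp x == c)

def csCumlt (exp : Nat) (arr : List Char) (c : Nat) : Nat :=
  ∑ t ∈ Finset.range c, (csF exp arr t).length

def grouped (exp : Nat) (arr : List Char) : List Char :=
  (List.range 256).flatMap (csF exp arr)

lemma csKey_lt (exp : Nat) (x : Char) : csKey exp x < 256 := by
  simp [csKey]; omega

lemma getD_eq_get {α : Type} (l : List α) (i : Nat) (d : α) (h : i < l.length) :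
    l.getD i d = l[i] := by
  rw [List.getD_eq_getElem?_getD, List.getElem?_eq_getElem h]; rfl

lemma getD_set_self {α : Type} (l : List α) (i : Nat) (v d : α) (h : i < l.length) :
    (l.set i v).getD i d = v := by
  rw [getD_eq_get _ _ _ (by simpa using h)]
  exact List.getElem_set_self (h := by simpa using h)

lemma getD_replicate {α : Type} (n i : Nat) (a : α) : (List.replicate n a).getD i a = a := by
  rw [List.getD_eq_getElem?_getD, List.getElem?_replicate]
  split_ifs <;> rfl

lemma getD_set_ne {α : Type} (l : List α) {i j : Nat} (v : α) (d : α) (h : i ≠ j) :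
    (l.set i v).getD j d = l.getD j d := by
  rw [List.getD_eq_getElem?_getD, List.getD_eq_getElem?_getD, List.getElem?_set_ne h]

lemma csCount_fold_len (exp : Nat) (arr : List Char) (f : List Nat) :
    (arr.foldl (fun cnt x => cnt.set (csKey exp x) (cnt.getD (csKey exp x) 0 + 1)) f).length
      = f.length := by
  induction arr generalizing f with
  | nil => rfl
  | cons x l ih => rw [List.foldl_cons, ih, List.length_set]

lemma csCount_fold (exp : Nat) (arr : List Char) (f : List Nat) (c : Nat)
    (hf : f.length = 256) (hc : c < 256) :
    (arr.foldl (fun cnt x => cnt.set (csKey exp x) (cnt.getD (csKey exp x) 0 + 1)) f).getD c 0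
      = f.getD c 0 + (csF exp arr c).length := by
  induction arr generalizing f with
  | nil => simp [csF]
  | cons x l ih =>
    rw [List.foldl_cons, ih _ (by simp [hf])]
    simp only [csF, List.filter_cons]
    by_cases h : csKey exp x = c
    · subst h
      rw [getD_set_self _ _ _ _ (by rw [hf]; exact csKey_lt exp x)]
      simp
      omega
    · rw [getD_set_ne _ _ _ h]
      simp only [beq_iff_eq, h]
      simp

lemma csCum_fold_len (f : List Nat) (m : Nat) :
    ((List.range' 1 m).foldl (fun c j => c.set j (c.getD j 0 + c.getD (j - 1) 0)) f).length
      = f.length := by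
  induction m generalizing f with
  | zero => rfl
  | succ m ih =>
    have hconc : List.range' 1 (m+1) = List.range' 1 m ++ [1+m] := by
      simpa using List.range'_concat (s := 1) (n := m) (step := 1)
    rw [hconc, List.foldl_append, List.foldl_cons, List.foldl_nil, List.length_set, ih]

lemma csCum_fold (f : List Nat) (hf : f.length = 256) : ∀ (m i : Nat), m ≤ 255 → i < 256 →
    ((List.range' 1 m).foldl (fun c j => c.set j (c.getD j 0 + c.getD (j - 1) 0)) f).getD i 0
      = if i ≤ m then ∑ t ∈ Finset.range (i + 1), f.getD t 0 else f.getD i 0 := by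
  intro m
  induction m with
  | zero =>
    intro i _ _
    simp only [List.range', List.foldl_nil]
    rcases Nat.eq_zero_or_pos i with h | h
    · subst h; simp
    · simp [Nat.pos_iff_ne_zero.mp h]
  | succ m ih =>
    intro i hm hi
    have hconc : List.range' 1 (m+1) = List.range' 1 m ++ [1+m] := by
      simpa using List.range'_concat (s := 1) (n := m) (step := 1)
    rw [hconc, List.foldl_append, List.foldl_cons, List.foldl_nil,
        show 1 + m = m + 1 from Nat.add_comm 1 m]
    have hlen : ((List.range' 1 m).foldl (fun c j => c.set j (c.getD j 0 + c.getD (j - 1) 0)) f).length = 256 := by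
      rw [csCum_fold_len, hf]
    by_cases hieq : i = m + 1
    · subst hieq
      rw [getD_set_self _ _ _ _ (by omega), ih (m+1) (by omega) (by omega), ih (m+1-1) (by omega) (by omega)]
      rw [if_neg (by omega), if_pos (by omega), if_pos (by omega)]
      have h2 : m + 1 - 1 + 1 = m + 1 := by omega
      rw [h2, Finset.sum_range_succ (f := fun t => f.getD t 0) (n := m + 1)]
      omega
    · rw [getD_set_ne _ _ _ (fun h => hieq h.symm), ih i (by omega) hi]
      by_cases h : i ≤ m
      · rw [if_pos h, if_pos (by omega)]
      · rw [if_neg h, if_neg (by omega)]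

lemma csCount_len (exp : Nat) (arr : List Char) : (csCount exp arr).length = 256 := by
  rw [csCount, csCount_fold_len, List.length_replicate]

lemma csCum_len (exp : Nat) (arr : List Char) : (csCum (csCount exp arr)).length = 256 := by
  rw [csCum, csCum_fold_len, csCount_len]

lemma csCum_spec (exp : Nat) (arr : List Char) (c : Nat) (hc : c < 256) :
    (csCum (csCount exp arr)).getD c 0 = csCumlt exp arr (c + 1) := by
  rw [csCum, csCum_fold _ (csCount_len exp arr) 255 c (by omega) hc, if_pos (by omega : c ≤ 255)]
  unfold csCumlt
  refine Finset.sum_congr rfl ?_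
  intro t htm
  have ht : t < 256 := by
    have := Finset.mem_range.mp htm
    omega
  rw [csCount, csCount_fold exp arr _ t (List.length_replicate) ht, getD_replicate]
  exact Nat.zero_add _

lemma csCumlt_mono (exp : Nat) (arr : List Char) {c c' : Nat} (h : c ≤ c') :
    csCumlt exp arr c ≤ csCumlt exp arr c' := by
  exact Finset.sum_le_sum_of_subset (fun x hx => Finset.mem_range.mpr (lt_of_lt_of_le (Finset.mem_range.mp hx) h))

lemma csCumlt_succ (exp : Nat) (arr : List Char) (c : Nat) :
    csCumlt exp arr (c + 1) = csCumlt exp arr c + (csF exp arr c).length := by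
  exact Finset.sum_range_succ _ c

lemma sum_len_filter (exp : Nat) (arr : List Char) :
    ∑ t ∈ Finset.range 256, (csF exp arr t).length = arr.length := by
  induction arr with
  | nil => simp [csF]
  | cons x l ih =>
    have hx : csKey exp x ∈ Finset.range 256 := Finset.mem_range.mpr (csKey_lt exp x)
    have step : ∀ t ∈ Finset.range 256, (csF exp (x :: l) t).length
        = (if csKey exp x = t then 1 else 0) + (csF exp l t).length := by
      intro t _
      simp only [csF, List.filter_cons]
      by_cases h : csKey exp x = t <;> simp [h, Nat.add_comm]
    rw [Finset.sum_congr rfl step, Finset.sum_add_distrib, Finset.sum_ite_eq, if_pos hx, ih]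
    simp [Nat.add_comm]

lemma csCumlt_total (exp : Nat) (arr : List Char) : csCumlt exp arr 256 = arr.length :=
  sum_len_filter exp arr

lemma filter_drop_le (exp : Nat) (arr : List Char) (j c : Nat) :
    ((arr.drop j).filter (fun x => csKey exp x == c)).length ≤ (csF exp arr c).length := by
  exact ((List.drop_sublist j arr).filter _).length_le

lemma csPlace_spec (exp : Nat) (arr : List Char) : ∀ (j : Nat) (cnt : List Nat) (out : List Char),
    j ≤ arr.length → cnt.length = 256 → out.length = arr.length →
    (∀ c, c < 256 → cnt.getD c 0 + ((arr.drop j).filter (fun x => csKey exp x == c)).length = csCumlt exp arr (c + 1)) →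
    (∀ c, c < 256 → ∀ t, t < ((arr.drop j).filter (fun x => csKey exp x == c)).length →
        out.getD (cnt.getD c 0 + t) ' ' = ((arr.drop j).filter (fun x => csKey exp x == c)).getD t ' ') →
    ∀ c, c < 256 → ∀ t, t < (csF exp arr c).length →
        (csPlace exp arr j cnt out).getD (csCumlt exp arr c + t) ' ' = (csF exp arr c).getD t ' ' := by
  intro j
  induction j with
  | zero =>
    intro cnt out _ _ _ I1 I2 c hc t ht
    simp only [csPlace]
    simp only [List.drop_zero] at I1 I2
    have h1 := I1 c hc
    have h2 := csCumlt_succ exp arr c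
    have hcnt : cnt.getD c 0 = csCumlt exp arr c := by
      have : (arr.filter (fun x => csKey exp x == c)).length = (csF exp arr c).length := rfl
      omega
    have h3 := I2 c hc t (by exact ht)
    rw [hcnt] at h3
    exact h3
  | succ j ih =>
    intro cnt out hjn hcl hol I1 I2 c hc t ht
    have hj : j < arr.length := by omega
    have hx : arr.getD j ' ' = arr[j] := by
      rw [List.getD_eq_getElem?_getD, List.getElem?_eq_getElem hj]; rfl
    have hdrop : arr.drop j = arr.getD j ' ' :: arr.drop (j + 1) := by
      rw [hx]; exact List.drop_eq_getElem_cons hj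
    have hfilter : ∀ c', (arr.drop j).filter (fun y => csKey exp y == c')
        = if csKey exp (arr.getD j ' ') = c'
          then (arr.getD j ' ') :: (arr.drop (j + 1)).filter (fun y => csKey exp y == c')
          else (arr.drop (j + 1)).filter (fun y => csKey exp y == c') := by
      intro c'
      rw [hdrop, List.filter_cons]
      by_cases h : csKey exp (arr.getD j ' ') = c'
      · subst h
        simp
      · simp only [beq_iff_eq, h]
    have hklt : csKey exp (arr.getD j ' ') < 256 := csKey_lt exp _
    have hkbound : ((arr.drop (j + 1)).filter (fun y => csKey exp y == csKey exp (arr.getD j ' '))).length + 1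
        ≤ (csF exp arr (csKey exp (arr.getD j ' '))).length := by
      have h1 := filter_drop_le exp arr j (csKey exp (arr.getD j ' '))
      rw [hfilter _, if_pos rfl] at h1
      simpa using h1
    have hcntk := I1 _ hklt
    have hsucck := csCumlt_succ exp arr (csKey exp (arr.getD j ' '))
    have hcntk_ge : cnt.getD (csKey exp (arr.getD j ' ')) 0 ≥ csCumlt exp arr (csKey exp (arr.getD j ' ')) + 1 := by
      omega
    have hcntk_le : cnt.getD (csKey exp (arr.getD j ' ')) 0 ≤ arr.length := by
      have hm := csCumlt_mono exp arr (show csKey exp (arr.getD j ' ') + 1 ≤ 256 by omega)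
      have htot := csCumlt_total exp arr
      omega
    simp only [csPlace]
    apply ih _ _ (by omega) (by simp [hcl]) (by simp [hol]) ?_ ?_ c hc t ht
    · -- new I1
      intro c' hc'
      by_cases h : csKey exp (arr.getD j ' ') = c'
      · subst h
        rw [getD_set_self _ _ _ _ (by rw [hcl]; exact hklt), hfilter _, if_pos rfl]
        simp only [List.length_cons]
        omega
      · rw [getD_set_ne _ _ _ h, hfilter _, if_neg h]
        exact I1 c' hc'
    · -- new I2
      intro c' hc' t' ht'
      by_cases h : csKey exp (arr.getD j ' ') = c'
      · subst h
        rw [getD_set_self _ _ _ _ (by rw [hcl]; exact hklt)]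
        rw [hfilter _, if_pos rfl] at ht' ⊢
        match t' with
        | 0 =>
          have hpos : cnt.getD (csKey exp (arr.getD j ' ')) 0 - 1 + 0
              = cnt.getD (csKey exp (arr.getD j ' ')) 0 - 1 := by omega
          rw [hpos, getD_set_self _ _ _ _ (by rw [hol]; omega), List.getD_cons_zero]
        | u + 1 =>
          have hpos : cnt.getD (csKey exp (arr.getD j ' ')) 0 - 1 + (u + 1)
              = cnt.getD (csKey exp (arr.getD j ' ')) 0 + u := by omega
          rw [hpos, getD_set_ne _ _ _ (by omega), List.getD_cons_succ]
          exact I2 _ hklt u (by simp only [List.length_cons] at ht'; omega)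
      · rw [getD_set_ne _ _ _ h]
        rw [hfilter _, if_neg h] at ht' ⊢
        have hA1 := I1 c' hc'
        have hA2 := csCumlt_succ exp arr c'
        have hA3 : ((arr.drop (j + 1)).filter (fun y => csKey exp y == c')).length
            ≤ (csF exp arr c').length := by
          have h1 := filter_drop_le exp arr j c'
          rw [hfilter _, if_neg h] at h1
          exact h1
        have hmono : (c' < csKey exp (arr.getD j ' ') →
              csCumlt exp arr (c' + 1) ≤ csCumlt exp arr (csKey exp (arr.getD j ' '))) ∧
            (csKey exp (arr.getD j ' ') < c' →
              csCumlt exp arr (csKey exp (arr.getD j ' ') + 1) ≤ csCumlt exp arr c') := by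
          constructor <;> intro hlt <;> exact csCumlt_mono exp arr (by omega)
        have hne : cnt.getD (csKey exp (arr.getD j ' ')) 0 - 1 ≠ cnt.getD c' 0 + t' := by
          rcases Nat.lt_or_ge c' (csKey exp (arr.getD j ' ')) with hlt | hge
          · have := hmono.1 hlt
            omega
          · have hgt : csKey exp (arr.getD j ' ') < c' := by omega
            have := hmono.2 hgt
            omega
        rw [getD_set_ne _ _ _ hne]
        exact I2 c' hc' t' ht'

lemma sum_map_range (g : Nat → Nat) (N : Nat) :
    ((List.range N).map g).sum = ∑ t ∈ Finset.range N, g t := by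
  induction N with
  | zero => simp
  | succ n ih => rw [List.range_succ, List.map_append, List.sum_append, Finset.sum_range_succ, ih]; simp

lemma grouped_length (exp : Nat) (arr : List Char) :
    (grouped exp arr).length = arr.length := by
  rw [grouped, List.length_flatMap, sum_map_range]
  exact sum_len_filter exp arr

lemma grouped_getD (exp : Nat) (arr : List Char) (c t : Nat) (hc : c < 256)
    (ht : t < (csF exp arr c).length) :
    (grouped exp arr).getD (csCumlt exp arr c + t) ' ' = (csF exp arr c).getD t ' ' := by
  have hsplit : List.range 256 = List.range c ++ c :: ((List.range (255 - c)).map (fun u => c + Nat.succ u)) := by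
    have h0 := @List.range_add c (256 - c)
    rw [show c + (256 - c) = 256 from by omega] at h0
    rw [h0, show 256 - c = (255 - c) + 1 from by omega, List.range_succ_eq_map]
    simp [List.map_map, Function.comp_def]
  rw [grouped, hsplit, List.flatMap_append, List.flatMap_cons]
  have hlen : ((List.range c).flatMap (csF exp arr)).length = csCumlt exp arr c := by
    rw [List.length_flatMap, sum_map_range]; rfl
  rw [List.getD_eq_getElem?_getD,
      List.getElem?_append_right (by rw [hlen]; omega),
      show csCumlt exp arr c + t - ((List.range c).flatMap (csF exp arr)).length = t from by rw [hlen]; omega,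
      List.getElem?_append_left ht, ← List.getD_eq_getElem?_getD]

lemma exists_block (g : Nat → Nat) (N q : Nat) (h : q < ∑ c ∈ Finset.range N, g c) :
    ∃ c, c < N ∧ ∑ c' ∈ Finset.range c, g c' ≤ q ∧ q < (∑ c' ∈ Finset.range c, g c') + g c := by
  induction N with
  | zero => simp at h
  | succ n ih =>
    rcases lt_or_ge q (∑ c ∈ Finset.range n, g c) with h' | h'
    · obtain ⟨c, hc, h1, h2⟩ := ih h'
      exact ⟨c, by omega, h1, h2⟩
    · refine ⟨n, by omega, h', ?_⟩
      rw [Finset.sum_range_succ] at h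
      omega

lemma csPass_eq_grouped (exp : Nat) (arr : List Char) :
    csPass exp arr = grouped exp arr := by
  have base1 : ∀ c, c < 256 → (csCum (csCount exp arr)).getD c 0
      + ((arr.drop arr.length).filter (fun x => csKey exp x == c)).length = csCumlt exp arr (c + 1) := by
    intro c hc
    rw [List.drop_length]
    simpa using csCum_spec exp arr c hc

  have base2 : ∀ c, c < 256 → ∀ t, t < ((arr.drop arr.length).filter (fun x => csKey exp x == c)).length →
      (List.replicate arr.length ' ').getD ((csCum (csCount exp arr)).getD c 0 + t) ' '
        = ((arr.drop arr.length).filter (fun x => csKey exp x == c)).getD t ' ' := by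
    intro c hc t ht
    rw [List.drop_length] at ht
    simp at ht
  have P := csPlace_spec exp arr arr.length (csCum (csCount exp arr)) (List.replicate arr.length ' ')
    (le_refl _) (csCum_len exp arr) (by simp) base1 base2
  have hsum : ∑ c ∈ Finset.range 256, (csF exp arr c).length = arr.length := sum_len_filter exp arr
  apply List.ext_getElem
  · simp [csPass, grouped_length]
  · intro i h1 h2
    have hi : i < arr.length := by simpa [csPass] using h1
    obtain ⟨c, hc, hl, hr⟩ := exists_block (fun c => (csF exp arr c).length) 256 i (by simpa [hsum] using hi)
    have hl' : csCumlt exp arr c ≤ i := hl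
    have hr' : i < csCumlt exp arr c + (csF exp arr c).length := hr
    have ht : i - csCumlt exp arr c < (csF exp arr c).length := by omega
    have hi' : csCumlt exp arr c + (i - csCumlt exp arr c) = i := by omega
    have e1 : (csPass exp arr)[i]
        = (csPlace exp arr arr.length (csCum (csCount exp arr)) (List.replicate arr.length ' ')).getD i ' ' := by
      simp [csPass]
    have e2 : (grouped exp arr)[i] = (grouped exp arr).getD i ' ' := by
      rw [List.getD_eq_getElem?_getD, List.getElem?_eq_getElem h2]; rfl
    rw [e1, e2, ← hi', P c hc _ ht, grouped_getD exp arr c _ hc ht]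

lemma bkBuckets_fold_len (exp : Nat) (arr : List Char) (f : List (List Char)) :
    (arr.foldl (fun bs x => bs.set (bkKey exp x) (bs.getD (bkKey exp x) [] ++ [x])) f).length
      = f.length := by
  induction arr generalizing f with
  | nil => rfl
  | cons x l ih => rw [List.foldl_cons, ih, List.length_set]

lemma bkBuckets_fold (exp : Nat) (arr : List Char) (f : List (List Char)) (c : Nat)
    (hf : f.length = 256) (hc : c < 256) :
    (arr.foldl (fun bs x => bs.set (bkKey exp x) (bs.getD (bkKey exp x) [] ++ [x])) f).getD c []
      = f.getD c [] ++ arr.filter (fun x => bkKey exp x == c) := by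
  induction arr generalizing f with
  | nil => simp
  | cons x l ih =>
    rw [List.foldl_cons, ih _ (by simp [hf]), List.filter_cons]
    by_cases h : bkKey exp x = c
    · subst h
      rw [getD_set_self _ _ _ _ (by rw [hf]; exact csKey_lt exp x)]
      simp
    · rw [getD_set_ne _ _ _ h]
      simp only [beq_iff_eq, h]
      simp

lemma bkPass_eq_grouped (exp : Nat) (arr : List Char) :
    bkPass exp arr = grouped exp arr := by
  rw [bkPass, grouped, List.flatMap_def]
  congr 1
  apply List.ext_getElem
  · rw [bkBuckets, bkBuckets_fold_len, List.length_replicate, List.length_map, List.length_range]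
  · intro i h1 h2
    have hi : i < 256 := by
      have hlen := bkBuckets_fold_len exp arr (List.replicate 256 ([] : List Char))
      rw [bkBuckets, hlen, List.length_replicate] at h1
      exact h1
    have e1 : (bkBuckets exp arr)[i] = (bkBuckets exp arr).getD i [] := by
      rw [List.getD_eq_getElem?_getD, List.getElem?_eq_getElem h1]; rfl
    rw [e1, bkBuckets, bkBuckets_fold exp arr _ i (List.length_replicate) hi,
        getD_replicate, List.nil_append, List.getElem_map, List.getElem_range]
    rfl

lemma pass_eq (exp : Nat) (arr : List Char) : csPass exp arr = bkPass exp arr := by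
  rw [csPass_eq_grouped, bkPass_eq_grouped]

lemma driver_eq (maxd : Nat) : ∀ (fuel exp : Nat) (arr : List Char) (steps : List (List Char)),
    csDriver maxd fuel exp arr steps = bkDriver maxd fuel exp arr steps := by
  intro fuel
  induction fuel with
  | zero => intro exp arr steps; rfl
  | succ f ih =>
    intro exp arr steps
    simp only [csDriver, bkDriver, pass_eq]
    split_ifs with h
    · exact ih _ _ _
    · rfl

-- ===== VERDICT (by name: the statement is the Claim_ definition above) =====
theorem radix_sort_characters_steps_spec : Claim_equal_radix_sort_characters_steps := by
  intro s _ _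
  show _ = _
  unfold radix_sort_characters_steps radix_sort_characters_steps_alt
  simp only [driver_eq]
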